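-- pv_equiv track=rewrite | github.com/johannesnicolaus/TOGA2 | src/python/modules/intron_gain_check.py | get_all_indels
-- ===== SOURCE A (Python) =====
-- from typing import Any, Dict, Iterable, List, Optional, Tuple, TypeVar, Union
--
-- def get_all_indels(seq: str) -> List[int]:
--     """ """
--     all_indels: List[int] = []
--     prev_indel: bool = False
--     indel_len: int = 0
--     for i in seq:
--         if i == "-":
--             if not prev_indel:
--                 prev_indel = True
--             indel_len += 1
--         elif i != "-" and prev_indel:
--             all_indels.append(indel_len)
--             prev_indel = False
--             indel_len = 0
--     return all_indels
-- ===== SOURCE B (Python) =====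
-- def get_all_indels(seq):
--     """Gap lengths via positions: every maximal dash run lies between two
--     consecutive non-dash positions (with a virtual position -1 before the
--     string); its length is the difference minus one.  A trailing dash run
--     has no following non-dash position, so it is never emitted."""
--     positions = [i for i, c in enumerate(seq) if c != '-']
--     return [j - i - 1 for i, j in zip([-1] + positions, positions) if j - i > 1]
-- ===== Notes on version B (the rewrite author's own statement) =====
-- stated objective: alternative
-- what changed: Replaces the per-character flag/counter state machine with two staged comprehensions: collect the positions of all non-dash characters, then emit the difference-minus-one between consecutive positions (with a virtual -1 in front) whenever it is positive; a trailing dash run is dropped automatically because it has no following position.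
import Mathlib
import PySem

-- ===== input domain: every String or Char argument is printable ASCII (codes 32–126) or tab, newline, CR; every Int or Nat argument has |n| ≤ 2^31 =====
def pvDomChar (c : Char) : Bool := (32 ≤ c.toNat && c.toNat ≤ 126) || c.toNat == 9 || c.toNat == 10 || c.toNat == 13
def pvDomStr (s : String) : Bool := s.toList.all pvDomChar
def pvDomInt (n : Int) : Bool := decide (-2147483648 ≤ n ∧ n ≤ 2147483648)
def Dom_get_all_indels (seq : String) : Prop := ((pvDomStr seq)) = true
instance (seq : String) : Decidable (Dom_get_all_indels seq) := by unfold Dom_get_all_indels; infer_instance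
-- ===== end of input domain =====

-- B replaces A's per-character flag/counter state machine with two staged comprehensions
-- (positions of non-dash characters, then differences of consecutive positions): alternative decomposition, same cost.


-- ===== PORT A =====
-- state = (all_indels, prev_indel, indel_len), updated per character exactly as A's loop body
def aStep (s : List Int × Bool × Int) (i : Char) : List Int × Bool × Int :=
  if i = '-' then (s.1, true, s.2.2 + 1)
  else if i ≠ '-' ∧ s.2.1 = true then (s.1 ++ [s.2.2], false, 0)
  else s

def get_all_indels (seq : String) : List Int :=
  (seq.toList.foldl aStep ([], false, 0)).1

-- ===== PORT B =====
-- positions = [i for i, c in enumerate(seq) if c != '-']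
-- return [j - i - 1 for i, j in zip([-1] + positions, positions) if j - i > 1]
def get_all_indels_alt (seq : String) : List Int :=
  let positions : List Int :=
    (((PySem.List.enumerate seq.toList)).filter (fun p => p.2 ≠ '-')).map (fun p => p.1)
  ((List.zip ((-1 : Int) :: positions) positions).filter
      (fun p => p.2 - p.1 > 1)).map (fun p => p.2 - p.1 - 1)

-- ===== PRECONDITION & SPEC =====
def Spec_get_all_indels (seq : String) (out : List Int) : Prop := out = get_all_indels_alt seq
instance (seq : String) (out : List Int) : Decidable (Spec_get_all_indels seq out) := by unfold Spec_get_all_indels; infer_instance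

-- ===== CLAIM (what is proved, stated in full; the proofs are below) =====
def Claim_equal_get_all_indels : Prop := ∀ (seq : String), Dom_get_all_indels seq → Spec_get_all_indels seq (get_all_indels seq)

-- ===== LEMMAS AND PROOFS =====

-- gap list computed recursively from a "previous position" l and a start offset m
def gaps (l : Int) (m : Int) (cs : List Char) : List Int :=
  match cs with
  | [] => []
  | c :: rest =>
    if c = '-' then gaps l (m + 1) rest
    else (if m - l > 1 then [m - l - 1] else []) ++ gaps m (m + 1) rest

-- B's zip/filter/map pipeline over a position list equals the recursive gap walk
def zipGaps (l : Int) (ps : List Int) : List Int :=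
  ((List.zip (l :: ps) ps).filter (fun p => p.2 - p.1 > 1)).map (fun p => p.2 - p.1 - 1)

lemma zipGaps_cons (l p : Int) (ps : List Int) :
    zipGaps l (p :: ps) = (if p - l > 1 then [p - l - 1] else []) ++ zipGaps p ps := by
  by_cases h : p - l > 1 <;>
    simp [zipGaps, List.zip_cons_cons, List.filter_cons, h]

lemma B_eq_gaps : ∀ (cs : List Char) (l m : Int),
    zipGaps l ((((PySem.List.enumerate cs m)).filter (fun p => p.2 ≠ '-')).map (fun p => p.1))
      = gaps l m cs := by
  intro cs
  induction cs with
  | nil => intro l m; simp [PySem.List.enumerate_nil, zipGaps, gaps]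
  | cons c rest ih =>
    intro l m
    rw [PySem.List.enumerate_cons, List.filter_cons]
    by_cases hc : c = '-'
    · simp only [hc, gaps]
      simpa using ih l (m + 1)
    · simp only [gaps, if_neg hc]
      have : (fun p : Int × Char => decide (p.2 ≠ '-')) (m, c) = true := by simp [hc]
      simp only [this, if_pos, List.map_cons, zipGaps_cons]
      rw [ih m (m + 1)]

-- A's fold produces the same gaps: false-state invariant l = m - 1, true-state k = m - l - 1
lemma A_eq_gaps : ∀ (cs : List Char) (m l : Int) (acc : List Int),
    (l = m - 1 → (List.foldl aStep (acc, false, 0) cs).1 = acc ++ gaps l m cs) ∧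
    (∀ k : Int, 1 ≤ k → k = m - l - 1 →
      (List.foldl aStep (acc, true, k) cs).1 = acc ++ gaps l m cs) := by
  intro cs
  induction cs with
  | nil => intro m l acc; refine ⟨fun _ => by simp [gaps], fun k _ _ => by simp [gaps]⟩
  | cons c rest ih =>
    intro m l acc
    by_cases hc : c = '-'
    · subst hc
      constructor
      · intro hl
        show (List.foldl aStep (aStep (acc, false, 0) '-') rest).1 = _
        simp only [aStep]
        rw [gaps, if_pos rfl]
        exact (ih (m + 1) l acc).2 (0 + 1) (by omega) (by omega)
      · intro k hk hkl
        show (List.foldl aStep (aStep (acc, true, k) '-') rest).1 = _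
        simp only [aStep]
        rw [gaps, if_pos rfl]
        exact (ih (m + 1) l acc).2 (k + 1) (by omega) (by omega)
    · constructor
      · intro hl
        show (List.foldl aStep (aStep (acc, false, 0) c) rest).1 = _
        simp only [aStep, if_neg hc]
        rw [if_neg (by simp [hc])]
        rw [gaps, if_neg hc, if_neg (by omega)]
        simpa using (ih (m + 1) m acc).1 (by omega)
      · intro k hk hkl
        show (List.foldl aStep (aStep (acc, true, k) c) rest).1 = _
        simp only [aStep, if_neg hc]
        rw [if_pos (by simp [hc])]
        rw [gaps, if_neg hc, if_pos (by omega)]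
        rw [hkl]
        have := (ih (m + 1) m (acc ++ [m - l - 1])).1 (by omega)
        rw [this, List.append_assoc]

-- ===== VERDICT (by name: the statement is the Claim_ definition above) =====
theorem get_all_indels_spec : Claim_equal_get_all_indels := by
  intro seq _
  unfold Spec_get_all_indels get_all_indels get_all_indels_alt
  rw [show ((-1 : Int)) = (0 : Int) - 1 by norm_num] at *
  have hB := B_eq_gaps seq.toList (-1) 0
  have hA := (A_eq_gaps seq.toList 0 (-1) []).1 (by omega)
  simp only [List.nil_append] at hA
  rw [hA, ← hB]
  rfl
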